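-- pv_equiv track=rewrite | github.com/vedanth-jadhav/stonks-copy | quant_trading/db/repository.py | _parse_desk_message
-- ===== SOURCE A (Python) =====
-- def _parse_desk_message(raw_text: str) -> dict[str, object]:
--     text = raw_text.strip()
--     lower = text.lower()
--     tokens = [token.strip(",. ") for token in text.split()]
--     symbols = [token.upper().replace(".NS", "") for token in tokens]
--     ticker = next((token for token in symbols if token.isalpha() and 2 <= len(token) <= 15), None)
--     parsed: dict[str, object] = {"kind": "note_only", "summary": text[:160]}
--     if "ban" in lower and ticker:
--         parsed = {"kind": "ban_ticker", "ticker": ticker}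
--     elif "watch" in lower and ticker:
--         parsed = {"kind": "watch_ticker", "ticker": ticker}
--     elif "quality only" in lower:
--         parsed = {"kind": "quality_only"}
--     elif "pause entries" in lower:
--         parsed = {"kind": "pause_entries"}
--     elif "reduce max deploy" in lower:
--         parsed = {"kind": "reduce_max_deploy"}
--     elif ("disable" in lower or "turn off" in lower) and "agent_" in lower:
--         agent = next((token for token in tokens if token.startswith("agent_")), None)
--         if agent:
--             parsed = {"kind": "disable_agent", "agent_id": agent}
--     elif "rerun" in lower and "agent_" in lower:
--         agent = next((token for token in tokens if token.startswith("agent_")), None)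
--         if agent:
--             parsed = {"kind": "rerun_agent", "agent_id": agent}
--     elif "bug" in lower or "investigate" in lower:
--         parsed = {"kind": "investigate_bug", "summary": text[:160]}
--     return parsed
-- ===== SOURCE B (Python) =====
-- SPEC = [
--     ("ban_ticker", ("ban",), "ticker"),
--     ("watch_ticker", ("watch",), "ticker"),
--     ("quality_only", ("quality only",), None),
--     ("pause_entries", ("pause entries",), None),
--     ("reduce_max_deploy", ("reduce max deploy",), None),
--     ("disable_agent", ("disable", "turn off"), "agent"),
--     ("rerun_agent", ("rerun",), "agent"),
--     ("investigate_bug", ("bug", "investigate"), None),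
-- ]
-- RANK = {kind: i for i, (kind, _, _) in enumerate(SPEC)}
--
--
-- def _parse_desk_message(raw_text: str) -> dict[str, object]:
--     text = raw_text.strip()
--     lower = text.lower()
--     tokens = [t.strip(",. ") for t in text.split()]
--     symbols = [t.upper().replace(".NS", "") for t in tokens]
--     ticker = next((s for s in symbols if s.isalpha() and 2 <= len(s) <= 15), None)
--     agent = next((t for t in tokens if t.startswith("agent_")), None)
--
--     def holds(guard):
--         if guard == "ticker":
--             return ticker is not None
--         if guard == "agent":
--             return "agent_" in lower
--         return True
--
--     # stage 1: evaluate every rule, collecting the set of all matching kinds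
--     matched = {kind for kind, words, guard in SPEC
--                if any(w in lower for w in words) and holds(guard)}
--     # stage 2: the highest-priority matched kind wins
--     kind = min(matched, key=RANK.get, default="note_only")
--
--     # stage 3: render the payload from the kind's shape
--     if kind in ("ban_ticker", "watch_ticker"):
--         return {"kind": kind, "ticker": ticker}
--     if kind in ("disable_agent", "rerun_agent"):
--         if agent is None:
--             kind = "note_only"
--         else:
--             return {"kind": kind, "agent_id": agent}
--     if kind in ("note_only", "investigate_bug"):
--         return {"kind": kind, "summary": text[:160]}
--     return {"kind": kind}
-- ===== Notes on version B (the rewrite author's own statement) =====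
-- stated objective: alternative
-- what changed: Instead of A's short-circuit if/elif chain, B evaluates every rule of a declarative keyword/guard spec, collects the full set of matching kinds, selects the winner as the minimum under a precomputed priority ranking, and renders the payload in a separate stage grouped by payload shape (ticker / agent / summary / bare).
import Mathlib
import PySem

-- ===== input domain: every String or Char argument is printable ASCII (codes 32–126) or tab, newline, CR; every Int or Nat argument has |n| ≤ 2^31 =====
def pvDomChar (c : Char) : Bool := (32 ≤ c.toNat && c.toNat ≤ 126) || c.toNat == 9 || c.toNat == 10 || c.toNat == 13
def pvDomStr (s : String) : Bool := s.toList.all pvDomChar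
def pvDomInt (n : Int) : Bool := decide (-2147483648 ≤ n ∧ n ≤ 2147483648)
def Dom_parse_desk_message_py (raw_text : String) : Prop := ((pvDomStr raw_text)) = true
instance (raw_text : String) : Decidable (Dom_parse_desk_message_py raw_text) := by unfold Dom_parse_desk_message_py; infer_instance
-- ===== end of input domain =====

-- B replaces A's short-circuit if/elif chain by a declarative rule spec: evaluate ALL
-- rules, collect the set of matching kinds, pick the winner as the minimum under a
-- priority ranking, then render the payload by shape (objective: alternative; same cost).

-- ===== PORT A =====
-- literal transliteration of A's if/elif chain; Python truthiness of the Optional[str]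
-- ticker/agent ('if ticker:') is ported as .getD "" followed by a != "" test (a found
-- ticker has length ≥ 2 and a found agent starts with "agent_", so "" is unambiguous)
def parse_desk_message_py (raw_text : String) : List (String × String) :=
  let text := PySem.Str.strip raw_text
  let lower := PySem.Str.lower text
  let tokens := (PySem.Str.split₀ text).map (fun t => PySem.Str.stripChars t ",. ")
  let symbols := tokens.map (fun t => PySem.Str.replace (PySem.Str.upper t) ".NS" "")
  let ticker := (symbols.find? (fun t => PySem.Str.strIsalpha t &&
                  decide (2 ≤ PySem.Str.len t) && decide (PySem.Str.len t ≤ 15))).getD ""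
  let parsed : List (String × String) :=
    [("kind", "note_only"), ("summary", PySem.Str.slice text none (some 160))]
  if PySem.Str.isIn "ban" lower && (ticker != "") then
    [("kind", "ban_ticker"), ("ticker", ticker)]
  else if PySem.Str.isIn "watch" lower && (ticker != "") then
    [("kind", "watch_ticker"), ("ticker", ticker)]
  else if PySem.Str.isIn "quality only" lower then
    [("kind", "quality_only")]
  else if PySem.Str.isIn "pause entries" lower then
    [("kind", "pause_entries")]
  else if PySem.Str.isIn "reduce max deploy" lower then
    [("kind", "reduce_max_deploy")]
  else if (PySem.Str.isIn "disable" lower || PySem.Str.isIn "turn off" lower) &&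
          PySem.Str.isIn "agent_" lower then
    let agent := (tokens.find? (fun t => PySem.Str.startswith t "agent_")).getD ""
    if agent != "" then [("kind", "disable_agent"), ("agent_id", agent)] else parsed
  else if PySem.Str.isIn "rerun" lower && PySem.Str.isIn "agent_" lower then
    let agent := (tokens.find? (fun t => PySem.Str.startswith t "agent_")).getD ""
    if agent != "" then [("kind", "rerun_agent"), ("agent_id", agent)] else parsed
  else if PySem.Str.isIn "bug" lower || PySem.Str.isIn "investigate" lower then
    [("kind", "investigate_bug"), ("summary", PySem.Str.slice text none (some 160))]
  else parsed

-- ===== PORT B =====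
-- Source B's module-level SPEC: (kind, trigger substrings, guard tag)
def pdm_SPEC : List (String × List String × Option String) :=
  [("ban_ticker", ["ban"], some "ticker"),
   ("watch_ticker", ["watch"], some "ticker"),
   ("quality_only", ["quality only"], none),
   ("pause_entries", ["pause entries"], none),
   ("reduce_max_deploy", ["reduce max deploy"], none),
   ("disable_agent", ["disable", "turn off"], some "agent"),
   ("rerun_agent", ["rerun"], some "agent"),
   ("investigate_bug", ["bug", "investigate"], none)]

-- Source B's RANK = {kind: i for i, (kind, _, _) in enumerate(SPEC)}
def pdm_RANK : PySem.Dict String Int :=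
  (PySem.List.enumerate pdm_SPEC).foldl (fun d p => d.insert p.2.1 p.1) PySem.Dict.empty

-- transliteration of Source B: evaluate every SPEC rule, collect the matched kinds as a
-- set, take the minimum-rank kind (min(matched, key=RANK.get, default=...); RANK.get
-- never returns None on a matched kind, ported as get?.getD 0; Python's min over the
-- set is order-independent since ranks are distinct), then render the payload by shape
def parse_desk_message_py_alt (raw_text : String) : List (String × String) :=
  let text := PySem.Str.strip raw_text
  let lower := PySem.Str.lower text
  let tokens := (PySem.Str.split₀ text).map (fun t => PySem.Str.stripChars t ",. ")
  let symbols := tokens.map (fun t => PySem.Str.replace (PySem.Str.upper t) ".NS" "")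
  let ticker : Option String := symbols.find? (fun t => PySem.Str.strIsalpha t &&
                  decide (2 ≤ PySem.Str.len t) && decide (PySem.Str.len t ≤ 15))
  let agent : Option String := tokens.find? (fun t => PySem.Str.startswith t "agent_")
  let holds : Option String → Bool := fun g =>
    if g == some "ticker" then ticker.isSome
    else if g == some "agent" then PySem.Str.isIn "agent_" lower
    else true
  let matched := PySem.Set.ofList
    ((pdm_SPEC.filter (fun r => r.2.1.any (fun w => PySem.Str.isIn w lower) && holds r.2.2)).map
      (fun r => r.1))
  let kind := PySem.List.minD matched (fun k => (PySem.Dict.get? pdm_RANK k).getD 0) "note_only"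
  if kind == "ban_ticker" || kind == "watch_ticker" then
    [("kind", kind), ("ticker", ticker.getD "")]
  else if kind == "disable_agent" || kind == "rerun_agent" then
    match agent with
    | some a => [("kind", kind), ("agent_id", a)]
    | none => [("kind", "note_only"), ("summary", PySem.Str.slice text none (some 160))]
  else if kind == "note_only" || kind == "investigate_bug" then
    [("kind", kind), ("summary", PySem.Str.slice text none (some 160))]
  else [("kind", kind)]

-- ===== PRECONDITION & SPEC =====
def Spec_parse_desk_message_py (raw_text : String) (out : List (String × String)) : Prop := out = parse_desk_message_py_alt raw_text
instance (raw_text : String) (out : List (String × String)) : Decidable (Spec_parse_desk_message_py raw_text out) := by unfold Spec_parse_desk_message_py; infer_instance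

-- ===== CLAIM (what is proved, stated in full; the proofs are below) =====
def Claim_equal_parse_desk_message_py : Prop := ∀ (raw_text : String), Dom_parse_desk_message_py raw_text → Spec_parse_desk_message_py raw_text (parse_desk_message_py raw_text)

-- ===== LEMMAS AND PROOFS =====

-- the rule engine (filter → set of kinds → minimum rank) selects the first rule of
-- pdm_SPEC whose predicate holds, for ANY predicate p
-- the rule engine (filter → set of kinds → minimum rank) selects the first rule of
-- pdm_SPEC whose predicate holds; auxiliary form over the 8 predicate values
set_option maxHeartbeats 2000000 in
theorem pdm_sel_aux (p : String × List String × Option String → Bool)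
    (b1 b2 b3 b4 b5 b6 b7 b8 : Bool)
    (e1 : p ("ban_ticker", ["ban"], some "ticker") = b1)
    (e2 : p ("watch_ticker", ["watch"], some "ticker") = b2)
    (e3 : p ("quality_only", ["quality only"], none) = b3)
    (e4 : p ("pause_entries", ["pause entries"], none) = b4)
    (e5 : p ("reduce_max_deploy", ["reduce max deploy"], none) = b5)
    (e6 : p ("disable_agent", ["disable", "turn off"], some "agent") = b6)
    (e7 : p ("rerun_agent", ["rerun"], some "agent") = b7)
    (e8 : p ("investigate_bug", ["bug", "investigate"], none) = b8) :
    PySem.List.minD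
      (PySem.Set.ofList
        ((pdm_SPEC.filter p).map (fun r => r.1)))
      (fun k => (PySem.Dict.get? pdm_RANK k).getD 0) "note_only" =
    (if b1 then "ban_ticker"
     else if b2 then "watch_ticker"
     else if b3 then "quality_only"
     else if b4 then "pause_entries"
     else if b5 then "reduce_max_deploy"
     else if b6 then "disable_agent"
     else if b7 then "rerun_agent"
     else if b8 then "investigate_bug"
     else "note_only") := by
  cases b1 <;> cases b2 <;> cases b3 <;> cases b4 <;> cases b5 <;> cases b6 <;>
    cases b7 <;> cases b8
  all_goals
    unfold pdm_SPEC
    rw [List.filter_cons, e1]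
    first | rw [if_pos rfl] | rw [if_neg Bool.false_ne_true]
    rw [List.filter_cons, e2]
    first | rw [if_pos rfl] | rw [if_neg Bool.false_ne_true]
    rw [List.filter_cons, e3]
    first | rw [if_pos rfl] | rw [if_neg Bool.false_ne_true]
    rw [List.filter_cons, e4]
    first | rw [if_pos rfl] | rw [if_neg Bool.false_ne_true]
    rw [List.filter_cons, e5]
    first | rw [if_pos rfl] | rw [if_neg Bool.false_ne_true]
    rw [List.filter_cons, e6]
    first | rw [if_pos rfl] | rw [if_neg Bool.false_ne_true]
    rw [List.filter_cons, e7]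
    first | rw [if_pos rfl] | rw [if_neg Bool.false_ne_true]
    rw [List.filter_cons, e8]
    first | rw [if_pos rfl] | rw [if_neg Bool.false_ne_true]
    rfl

theorem pdm_sel (p : String × List String × Option String → Bool) :
    PySem.List.minD
      (PySem.Set.ofList
        ((pdm_SPEC.filter p).map (fun r => r.1)))
      (fun k => (PySem.Dict.get? pdm_RANK k).getD 0) "note_only" =
    (if p ("ban_ticker", ["ban"], some "ticker") then "ban_ticker"
     else if p ("watch_ticker", ["watch"], some "ticker") then "watch_ticker"
     else if p ("quality_only", ["quality only"], none) then "quality_only"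
     else if p ("pause_entries", ["pause entries"], none) then "pause_entries"
     else if p ("reduce_max_deploy", ["reduce max deploy"], none) then "reduce_max_deploy"
     else if p ("disable_agent", ["disable", "turn off"], some "agent") then "disable_agent"
     else if p ("rerun_agent", ["rerun"], some "agent") then "rerun_agent"
     else if p ("investigate_bug", ["bug", "investigate"], none) then "investigate_bug"
     else "note_only") :=
  pdm_sel_aux p _ _ _ _ _ _ _ _ rfl rfl rfl rfl rfl rfl rfl rfl

-- ===== VERDICT (by name: the statement is the Claim_ definition above) =====
theorem parse_desk_message_py_spec : Claim_equal_parse_desk_message_py := by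
  intro raw_text _
  unfold Spec_parse_desk_message_py parse_desk_message_py parse_desk_message_py_alt
  dsimp only
  generalize PySem.Str.strip raw_text = text
  generalize PySem.Str.lower text = lower
  generalize List.map (fun t => PySem.Str.stripChars t ",. ") (PySem.Str.split₀ text) = tokens
  generalize List.map (fun t => PySem.Str.replace (PySem.Str.upper t) ".NS" "") tokens = symbols
  rw [pdm_sel]
  cases htick : List.find? (fun t => PySem.Str.strIsalpha t &&
      decide (2 ≤ PySem.Str.len t) && decide (PySem.Str.len t ≤ 15)) symbols with
  | none =>
    cases hag : List.find? (fun t => PySem.Str.startswith t "agent_") tokens with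
    | none =>
      simp only [Option.getD_none, Option.isSome_none,
        List.any_cons, List.any_nil, Bool.or_false, Bool.and_false,
        show ((some "ticker" : Option String) == some "ticker") = true from rfl,
        show ((some "agent" : Option String) == some "ticker") = false from rfl,
        show ((some "agent" : Option String) == some "agent") = true from rfl,
        show ((none : Option String) == some "ticker") = false from rfl,
        show ((none : Option String) == some "agent") = false from rfl,
        show (("" : String) != "") = false from rfl, if_true]
      generalize PySem.Str.isIn "quality only" lower = b3
      generalize PySem.Str.isIn "pause entries" lower = b4
      generalize PySem.Str.isIn "reduce max deploy" lower = b5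
      generalize (PySem.Str.isIn "disable" lower || PySem.Str.isIn "turn off" lower) = b6
      generalize (PySem.Str.isIn "bug" lower || PySem.Str.isIn "investigate" lower) = b8
      generalize PySem.Str.isIn "rerun" lower = b7
      generalize PySem.Str.isIn "agent_" lower = b9
      cases b3 <;> cases b4 <;> cases b5 <;> cases b6 <;> cases b7 <;> cases b8 <;> cases b9 <;> rfl
    | some a =>
      have haq := List.find?_some hag
      have hane : (a != "") = true := bne_iff_ne.mpr (fun h => absurd (h ▸ haq) (by decide))
      simp only [Option.getD_some, Option.getD_none, Option.isSome_none,
        List.any_cons, List.any_nil, Bool.or_false, Bool.and_false, hane,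
        show ((some "ticker" : Option String) == some "ticker") = true from rfl,
        show ((some "agent" : Option String) == some "ticker") = false from rfl,
        show ((some "agent" : Option String) == some "agent") = true from rfl,
        show ((none : Option String) == some "ticker") = false from rfl,
        show ((none : Option String) == some "agent") = false from rfl,
        show (("" : String) != "") = false from rfl, if_true]
      generalize PySem.Str.isIn "quality only" lower = b3
      generalize PySem.Str.isIn "pause entries" lower = b4
      generalize PySem.Str.isIn "reduce max deploy" lower = b5
      generalize (PySem.Str.isIn "disable" lower || PySem.Str.isIn "turn off" lower) = b6
      generalize (PySem.Str.isIn "bug" lower || PySem.Str.isIn "investigate" lower) = b8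
      generalize PySem.Str.isIn "rerun" lower = b7
      generalize PySem.Str.isIn "agent_" lower = b9
      cases b3 <;> cases b4 <;> cases b5 <;> cases b6 <;> cases b7 <;> cases b8 <;> cases b9 <;> rfl
  | some s =>
    have hsp := List.find?_some htick
    have hsne : (s != "") = true := by
      simp only [Bool.and_eq_true] at hsp
      obtain ⟨⟨hal, -⟩, -⟩ := hsp
      exact bne_iff_ne.mpr (fun h => absurd (h ▸ hal) (by decide))
    cases hag : List.find? (fun t => PySem.Str.startswith t "agent_") tokens with
    | none =>
      simp only [Option.getD_some, Option.getD_none, Option.isSome_some,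
        List.any_cons, List.any_nil, Bool.or_false, Bool.and_true, hsne,
        show ((some "ticker" : Option String) == some "ticker") = true from rfl,
        show ((some "agent" : Option String) == some "ticker") = false from rfl,
        show ((some "agent" : Option String) == some "agent") = true from rfl,
        show ((none : Option String) == some "ticker") = false from rfl,
        show ((none : Option String) == some "agent") = false from rfl,
        show (("" : String) != "") = false from rfl, if_true]
      generalize PySem.Str.isIn "ban" lower = b1
      generalize PySem.Str.isIn "watch" lower = b2
      generalize PySem.Str.isIn "quality only" lower = b3
      generalize PySem.Str.isIn "pause entries" lower = b4
      generalize PySem.Str.isIn "reduce max deploy" lower = b5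
      generalize (PySem.Str.isIn "disable" lower || PySem.Str.isIn "turn off" lower) = b6
      generalize (PySem.Str.isIn "bug" lower || PySem.Str.isIn "investigate" lower) = b8
      generalize PySem.Str.isIn "rerun" lower = b7
      generalize PySem.Str.isIn "agent_" lower = b9
      cases b1 <;> cases b2 <;> cases b3 <;> cases b4 <;> cases b5 <;> cases b6 <;>
        cases b7 <;> cases b8 <;> cases b9 <;> rfl
    | some a =>
      have haq := List.find?_some hag
      have hane : (a != "") = true := bne_iff_ne.mpr (fun h => absurd (h ▸ haq) (by decide))
      simp only [Option.getD_some, Option.isSome_some,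
        List.any_cons, List.any_nil, Bool.or_false, Bool.and_true, hsne, hane,
        show ((some "ticker" : Option String) == some "ticker") = true from rfl,
        show ((some "agent" : Option String) == some "ticker") = false from rfl,
        show ((some "agent" : Option String) == some "agent") = true from rfl,
        show ((none : Option String) == some "ticker") = false from rfl,
        show ((none : Option String) == some "agent") = false from rfl,
        if_true]
      generalize PySem.Str.isIn "ban" lower = b1
      generalize PySem.Str.isIn "watch" lower = b2
      generalize PySem.Str.isIn "quality only" lower = b3
      generalize PySem.Str.isIn "pause entries" lower = b4
      generalize PySem.Str.isIn "reduce max deploy" lower = b5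
      generalize (PySem.Str.isIn "disable" lower || PySem.Str.isIn "turn off" lower) = b6
      generalize (PySem.Str.isIn "bug" lower || PySem.Str.isIn "investigate" lower) = b8
      generalize PySem.Str.isIn "rerun" lower = b7
      generalize PySem.Str.isIn "agent_" lower = b9
      cases b1 <;> cases b2 <;> cases b3 <;> cases b4 <;> cases b5 <;> cases b6 <;>
        cases b7 <;> cases b8 <;> cases b9 <;> rfl
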